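-- pv_equiv track=rewrite | github.com/rubenxrodriguez/Summer25Projects | U18_Python/Scraper/sports_ref_scrape copy.py | parse_stats_table
-- ===== SOURCE A (Python) =====
-- def parse_stats_table(table_text):
--     """Properly parse the stats table accounting for multi-word columns"""
--     lines = table_text.split('\n')
--     headers = ['Season', 'Team', 'Conf', 'Class', 'Pos', 'G', 'GS', 'MP', 'FG', 'FGA', 'FG%',
--                '3P', '3PA', '3P%', '2P', '2PA', '2P%', 'eFG%', 'FT', 'FTA', 'FT%',
--                'ORB', 'DRB', 'TRB', 'AST', 'STL', 'BLK', 'TOV', 'PF', 'PTS', 'Awards']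
--
--     seasons = []
--     current_line = []
--
--     # Handle multi-line season entries (where awards wrap)
--     for line in lines[1:]:  # Skip header
--         parts = line.split()
--         if len(parts) > 5 and parts[0][0].isdigit():  # New season
--             if current_line:
--                 seasons.append(' '.join(current_line))
--             current_line = [line]
--         else:
--             current_line.append(line)
--
--     if current_line:
--         seasons.append(' '.join(current_line))
--
--     # Parse each season
--     season_data = []
--     for season in seasons:
--         parts = season.split()
--         season_dict = {}
--         i = 0
--         for header in headers:
--             if header == 'Awards' and i < len(parts):
--                 season_dict[header] = ' '.join(parts[i:])
--                 break
--             if i < len(parts):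
--                 season_dict[header] = parts[i]
--                 i += 1
--             else:
--                 season_dict[header] = None
--         season_data.append(season_dict)
--
--     return season_data
-- ===== SOURCE B (Python) =====
-- HEADERS = ['Season', 'Team', 'Conf', 'Class', 'Pos', 'G', 'GS', 'MP', 'FG', 'FGA', 'FG%',
--            '3P', '3PA', '3P%', '2P', '2PA', '2P%', 'eFG%', 'FT', 'FTA', 'FT%',
--            'ORB', 'DRB', 'TRB', 'AST', 'STL', 'BLK', 'TOV', 'PF', 'PTS', 'Awards']
--
--
-- def _is_new(t):
--     return len(t) > 5 and t[0][0].isdigit()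
--
--
-- def _row(parts):
--     # value vector: first 30 tokens padded with None, then the Awards tail
--     vals = parts[:30] + [None] * (30 - len(parts))
--     vals.append(' '.join(parts[30:]) if len(parts) > 30 else None)
--     return dict(zip(HEADERS, vals))
--
--
-- def _groups(toks):
--     # recursively cut the token-list list at new-season lines, flattening each slice
--     if not toks:
--         return []
--     i = 1
--     while i < len(toks) and not _is_new(toks[i]):
--         i += 1
--     return [[w for t in toks[:i] for w in t]] + _groups(toks[i:])
--
--
-- def parse_stats_table(table_text):
--     """Recursive slicing into season groups; rows built by zipping headers with a padded value vector."""
--     toks = [line.split() for line in table_text.split('\n')[1:]]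
--     return [_row(g) for g in _groups(toks)]
-- ===== Notes on version B (the rewrite author's own statement) =====
-- stated objective: alternative
-- what changed: B replaces A's two accumulator loops (collect lines per season, ' '-join them, re-split each joined string and walk the 31 headers with a running index) by a recursion that slices the list of tokenised lines at each new-season line and, per group, zips the header list against a padded value vector (tokens, then Nones, then the joined Awards tail).
import Mathlib
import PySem

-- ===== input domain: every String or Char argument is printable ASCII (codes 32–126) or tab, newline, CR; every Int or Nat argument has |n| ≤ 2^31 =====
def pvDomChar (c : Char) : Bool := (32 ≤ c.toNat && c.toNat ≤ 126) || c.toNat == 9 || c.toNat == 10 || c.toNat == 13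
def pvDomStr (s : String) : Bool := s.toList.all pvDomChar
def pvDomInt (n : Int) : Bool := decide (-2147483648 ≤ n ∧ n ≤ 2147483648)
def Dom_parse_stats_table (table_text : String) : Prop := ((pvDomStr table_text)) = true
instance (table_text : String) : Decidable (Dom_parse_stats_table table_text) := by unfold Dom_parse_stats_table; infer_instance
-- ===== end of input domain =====

-- B replaces A's accumulate-join-resplit loops by a recursion that slices the token-list
-- list at new-season lines and zips the headers with a padded value vector (objective: alternative).

-- ===== PORT A =====
-- the fixed header list of A
def pvHeadersA : List String :=
  ["Season", "Team", "Conf", "Class", "Pos", "G", "GS", "MP", "FG", "FGA", "FG%",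
   "3P", "3PA", "3P%", "2P", "2PA", "2P%", "eFG%", "FT", "FTA", "FT%",
   "ORB", "DRB", "TRB", "AST", "STL", "BLK", "TOV", "PF", "PTS", "Awards"]

-- len(parts) > 5 and parts[0][0].isdigit()  (parts[0] is a split() token, hence nonempty:
-- the `none` fallthroughs are unreachable on every input the ports see)
def pvIsNewA (parts : List String) : Bool :=
  decide (parts.length > 5) &&
    (match PySem.List.pyGet? parts 0 with
     | some t =>
       (match PySem.Str.pyGet? t 0 with
        | some c => PySem.Chars.isdigit c
        | none => false)
     | none => false)

-- the body of A's first loop (state = (seasons, current_line))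
def pvStepA (st : List String × List String) (line : String) : List String × List String :=
  let parts := PySem.Str.split₀ line
  if pvIsNewA parts then
    (if st.2.isEmpty then st.1 else st.1 ++ [PySem.Str.join " " st.2], [line])
  else
    (st.1, st.2 ++ [line])

-- A's per-season dict loop over `headers`; the dict is the assoc list in insertion order
-- (each header key is assigned exactly once)
def pvFieldsA (hs : List String) (parts : List String) (i : Nat) : List (String × Option String) :=
  match hs with
  | [] => []
  | h :: rest =>
    if h = "Awards" ∧ i < parts.length then
      [(h, some (PySem.Str.join " " (PySem.List.slice parts (some (i : Int)) none)))]  -- ' '.join(parts[i:]) then break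
    else if i < parts.length then
      (h, some (parts.getD i "")) :: pvFieldsA rest parts (i + 1)
    else
      (h, none) :: pvFieldsA rest parts i

def parse_stats_table (table_text : String) : List (List (String × Option String)) :=
  let lines := (PySem.Str.split? table_text "\n").getD []   -- sep "\n" ≠ "": never none
  let st := (PySem.List.slice lines (some 1) none).foldl pvStepA ([], [])
  let seasons := if st.2.isEmpty then st.1 else st.1 ++ [PySem.Str.join " " st.2]
  seasons.map (fun season => pvFieldsA pvHeadersA (PySem.Str.split₀ season) 0)

-- ===== PORT B =====
-- HEADERS of Source B
def pvHeadersB : List String :=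
  ["Season", "Team", "Conf", "Class", "Pos", "G", "GS", "MP", "FG", "FGA", "FG%",
   "3P", "3PA", "3P%", "2P", "2PA", "2P%", "eFG%", "FT", "FTA", "FT%",
   "ORB", "DRB", "TRB", "AST", "STL", "BLK", "TOV", "PF", "PTS", "Awards"]

-- _is_new(t): len(t) > 5 and t[0][0].isdigit()  (same unreachable-none remarks as for A)
def pvIsNewB (t : List String) : Bool :=
  decide (t.length > 5) &&
    (match PySem.List.pyGet? t 0 with
     | some w =>
       (match PySem.Str.pyGet? w 0 with
        | some c => PySem.Chars.isdigit c
        | none => false)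
     | none => false)

-- _row(parts): vals = parts[:30] + [None]*(30-len(parts)); vals.append(awards); dict(zip(HEADERS, vals))
-- ([None]*(30-n) is empty for n > 30, exactly Nat subtraction; the dict is returned as its assoc list)
def pvRowB (parts : List String) : List (String × Option String) :=
  let vals : List (Option String) :=
    (PySem.List.slice parts none (some 30)).map some
      ++ List.replicate (30 - parts.length) none
      ++ [if parts.length > 30 then some (PySem.Str.join " " (PySem.List.slice parts (some 30) none)) else none]
  (PySem.Dict.ofList (pvHeadersB.zip vals)).items

-- the `while i < len(toks) and not _is_new(toks[i])` loop of _groups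
-- (toks[i] with i < len(toks): getD never sees its default)
def pvExtent (toks : List (List String)) (i : Nat) : Nat :=
  if i < toks.length ∧ ¬ (pvIsNewB (toks.getD i []) = true) then pvExtent toks (i + 1) else i
  termination_by toks.length - i
  decreasing_by omega

theorem pvExtent_ge (toks : List (List String)) (i : Nat) : i ≤ pvExtent toks i := by
  unfold pvExtent
  split
  · exact Nat.le_trans (Nat.le_succ i) (pvExtent_ge toks (i + 1))
  · exact Nat.le_refl i
  termination_by toks.length - i
  decreasing_by omega

-- _groups(toks): recursive slicing at the first new-season line
def pvGroupsB (toks : List (List String)) : List (List String) :=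
  if toks.isEmpty then []
  else
    (PySem.List.slice toks none (some ((pvExtent toks 1 : Nat) : Int))).flatten
      :: pvGroupsB (PySem.List.slice toks (some ((pvExtent toks 1 : Nat) : Int)) none)
  termination_by toks.length
  decreasing_by
    have h1 : 1 ≤ pvExtent toks 1 := pvExtent_ge toks 1
    have h2 : toks ≠ [] := by simpa using ‹¬ toks.isEmpty = true›
    have h3 : 0 < toks.length := List.length_pos_of_ne_nil h2
    rw [PySem.List.slice_from_natCast]
    simp only [List.length_drop]
    omega

def parse_stats_table_alt (table_text : String) : List (List (String × Option String)) :=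
  let toks := (PySem.List.slice ((PySem.Str.split? table_text "\n").getD []) (some 1) none).map PySem.Str.split₀
  (pvGroupsB toks).map pvRowB

-- ===== PRECONDITION & SPEC =====
def Spec_parse_stats_table (table_text : String) (out : List (List (String × Option String))) : Prop := out = parse_stats_table_alt table_text
instance (table_text : String) (out : List (List (String × Option String))) : Decidable (Spec_parse_stats_table table_text out) := by unfold Spec_parse_stats_table; infer_instance

-- ===== CLAIM (what is proved, stated in full; the proofs are below) =====
def Claim_equal_parse_stats_table : Prop := ∀ (table_text : String), Dom_parse_stats_table table_text → Spec_parse_stats_table table_text (parse_stats_table table_text)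

-- ===== LEMMAS AND PROOFS =====

-- ---- split₀ distributes over ' '-joins (A joins lines / tokens; B never does) ----
theorem pvGo_acc (s : List Char) : ∀ (cur : List Char) (acc : List (List Char)),
    PySem.Chars.split₀.go s cur acc = acc.reverse ++ PySem.Chars.split₀.go s cur [] := by
  induction s with
  | nil =>
    intro cur acc
    by_cases h : cur.isEmpty <;> simp [PySem.Chars.split₀.go, h]
  | cons c rest ih =>
    intro cur acc
    by_cases hsp : PySem.Chars.isspace c
    · by_cases h : cur.isEmpty
      · simp only [PySem.Chars.split₀.go, hsp, h, if_true]
        exact ih [] acc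
      · simp only [PySem.Chars.split₀.go, hsp, h, if_true, if_false, Bool.false_eq_true]
        rw [ih [] (cur.reverse :: acc), ih [] [cur.reverse]]
        simp
    · simp only [PySem.Chars.split₀.go, hsp, Bool.false_eq_true, if_false]
      exact ih (c :: cur) acc

theorem pvGo_space (a : List Char) : ∀ (b cur : List Char) (acc : List (List Char)),
    PySem.Chars.split₀.go (a ++ ' ' :: b) cur acc
      = PySem.Chars.split₀.go a cur acc ++ PySem.Chars.split₀.go b [] [] := by
  induction a with
  | nil =>
    intro b cur acc
    have hsp : PySem.Chars.isspace ' ' = true := by decide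
    by_cases h : cur.isEmpty
    · show PySem.Chars.split₀.go (' ' :: b) cur acc = _
      simp only [PySem.Chars.split₀.go, hsp, h, if_true]
      exact pvGo_acc b [] acc
    · show PySem.Chars.split₀.go (' ' :: b) cur acc = _
      simp only [PySem.Chars.split₀.go, hsp, h, if_true, if_false, Bool.false_eq_true]
      exact pvGo_acc b [] (cur.reverse :: acc)
  | cons c rest ih =>
    intro b cur acc
    by_cases hsp : PySem.Chars.isspace c
    · by_cases h : cur.isEmpty <;>
        simp only [List.cons_append, PySem.Chars.split₀.go, hsp, h, if_true, if_false,
          Bool.false_eq_true] <;> exact ih b _ _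
    · simp only [List.cons_append, PySem.Chars.split₀.go, hsp, Bool.false_eq_true, if_false]
      exact ih b _ _

theorem pvSplit0_append (a b : List Char) :
    PySem.Chars.split₀ (a ++ ' ' :: b) = PySem.Chars.split₀ a ++ PySem.Chars.split₀ b := by
  simp [PySem.Chars.split₀, pvGo_space]

theorem pvSplit0_join (ls : List (List Char)) :
    PySem.Chars.split₀ (PySem.Chars.join [' '] ls) = ls.flatMap PySem.Chars.split₀ := by
  induction ls with
  | nil => simp [PySem.Chars.join_nil, PySem.Chars.split₀, PySem.Chars.split₀.go]
  | cons p rest ih =>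
    cases rest with
    | nil => simp [PySem.Chars.join_singleton]
    | cons q r =>
      rw [PySem.Chars.join_cons_cons]
      have : p ++ [' '] ++ PySem.Chars.join [' '] (q :: r) = p ++ ' ' :: PySem.Chars.join [' '] (q :: r) := by simp
      rw [this, pvSplit0_append, ih]
      simp

theorem pvStrSplit0_join (ls : List String) :
    PySem.Str.split₀ (PySem.Str.join " " ls) = ls.flatMap PySem.Str.split₀ := by
  have h1 : PySem.Str.split₀ (PySem.Str.join " " ls)
      = (PySem.Chars.split₀ (PySem.Str.join " " ls).toList).map String.ofList := rfl
  rw [h1, PySem.Str.toList_join]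
  have h2 : (" " : String).toList = [' '] := by decide
  rw [h2, pvSplit0_join, List.flatMap_map, List.map_flatMap]
  rfl

-- ---- ROWS: A's header walk equals B's zip with the padded value vector ----

-- A's per-season loop in a form without the Awards case inside
def pvFieldRow (hs : List String) (parts : List String) (i : Nat) : List (String × Option String) :=
  match hs with
  | [] => [("Awards", if i < parts.length then some (PySem.Str.join " " (parts.drop i)) else none)]
  | h :: t => (h, if i < parts.length then some (parts.getD i "") else none) :: pvFieldRow t parts (i + 1)

theorem pvFieldsA_saturated (hs : List String) : ∀ (parts : List String) (i j : Nat),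
    "Awards" ∉ hs → parts.length ≤ i → parts.length ≤ j →
    pvFieldsA (hs ++ ["Awards"]) parts i = pvFieldRow hs parts j := by
  induction hs with
  | nil =>
    intro parts i j _ hi hj
    simp [pvFieldsA, pvFieldRow, Nat.not_lt.mpr hi, Nat.not_lt.mpr hj]
  | cons h t ih =>
    intro parts i j hmem hi hj
    have hne : h ≠ "Awards" := fun h' => hmem (h' ▸ List.mem_cons_self)
    simp only [List.cons_append, pvFieldsA, pvFieldRow, hne, false_and, if_false,
      Nat.not_lt.mpr hi, Nat.not_lt.mpr hj, if_false]
    rw [ih parts i (j + 1) (fun hm => hmem (List.mem_cons_of_mem _ hm)) hi (Nat.le_succ_of_le hj)]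

theorem pvFieldsA_eq_fieldRow (hs : List String) : ∀ (parts : List String) (i : Nat),
    "Awards" ∉ hs → pvFieldsA (hs ++ ["Awards"]) parts i = pvFieldRow hs parts i := by
  induction hs with
  | nil =>
    intro parts i _
    by_cases h : i < parts.length
    · simp [pvFieldsA, pvFieldRow, h, PySem.List.slice_from parts (Int.natCast_nonneg i)]
    · simp [pvFieldsA, pvFieldRow, h]
  | cons h t ih =>
    intro parts i hmem
    have hne : h ≠ "Awards" := fun h' => hmem (h' ▸ List.mem_cons_self)
    have hmem' : "Awards" ∉ t := fun hm => hmem (List.mem_cons_of_mem _ hm)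
    by_cases hlt : i < parts.length
    · simp only [List.cons_append, pvFieldsA, pvFieldRow, hne, false_and, if_false, hlt, if_true]
      rw [ih parts (i + 1) hmem']
    · simp only [List.cons_append, pvFieldsA, pvFieldRow, hne, false_and, if_false, hlt, if_false]
      rw [pvFieldsA_saturated t parts i (i + 1) hmem' (Nat.not_lt.mp hlt)
        (Nat.le_succ_of_le (Nat.not_lt.mp hlt))]

-- pvFieldRow is the zip of the headers with the padded value vector
theorem pvFieldRow_eq_zip (hs : List String) : ∀ (parts : List String) (i : Nat),
    pvFieldRow hs parts i
      = hs.zip (((parts.drop i).take hs.length).map some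
                 ++ List.replicate (hs.length - (parts.length - i)) none)
        ++ [("Awards", if i + hs.length < parts.length
                       then some (PySem.Str.join " " (parts.drop (i + hs.length))) else none)] := by
  induction hs with
  | nil => intro parts i; simp [pvFieldRow]
  | cons h t ih =>
    intro parts i
    by_cases hlt : i < parts.length
    · have hdrop : parts.drop i = parts[i] :: parts.drop (i + 1) := List.drop_eq_getElem_cons hlt
      have hrep : (t.length + 1) - (parts.length - i) = t.length - (parts.length - (i + 1)) := by omega
      simp only [pvFieldRow, hlt, if_true, ih parts (i + 1), hdrop, List.length_cons,
        List.take_succ_cons, List.map_cons, List.cons_append, List.zip_cons_cons]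
      rw [hrep, List.getD_eq_getElem parts "" hlt]
      have : i + (t.length + 1) = i + 1 + t.length := by omega
      rw [this]
    · have hge : parts.length ≤ i := Nat.not_lt.mp hlt
      have hdrop : parts.drop i = [] := List.drop_of_length_le hge
      have hdrop1 : parts.drop (i + 1) = [] := List.drop_of_length_le (Nat.le_succ_of_le hge)
      have hz : parts.length - i = 0 := by omega
      have hz1 : parts.length - (i + 1) = 0 := by omega
      have hlt1 : ¬ i + (t.length + 1) < parts.length := by omega
      have hlt2 : ¬ i + 1 + t.length < parts.length := by omega
      simp only [pvFieldRow, hlt, if_false, ih parts (i + 1), hdrop, hdrop1, hz, hz1,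
        List.take_nil, List.map_nil, List.nil_append, List.length_cons, Nat.sub_zero,
        List.replicate_succ, List.zip_cons_cons, hlt1, hlt2, if_false, List.cons_append]

-- a dict built from pairs with distinct keys is that pair list
theorem pvItems_ofList_nodup (l : List (String × Option String)) (h : (l.map (·.1)).Nodup) :
    (PySem.Dict.ofList l).items = l := by
  have hfresh : ∀ a ∈ l, (PySem.Dict.empty (κ := String) (ν := Option String)).contains a.1 = false := by
    intro a _; simp [PySem.Dict.contains_empty]
  have := PySem.Dict.items_foldl_insert_fresh (l := l) (k := (·.1)) (v := (·.2))
    (d := PySem.Dict.empty) hfresh h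
  simpa [PySem.Dict.ofList, PySem.Dict.update] using this

-- the two per-season row builders agree
theorem pvRow_eq (parts : List String) :
    pvFieldsA pvHeadersA parts 0 = pvRowB parts := by
  have hsplit : pvHeadersA
      = ["Season", "Team", "Conf", "Class", "Pos", "G", "GS", "MP", "FG", "FGA", "FG%",
         "3P", "3PA", "3P%", "2P", "2PA", "2P%", "eFG%", "FT", "FTA", "FT%",
         "ORB", "DRB", "TRB", "AST", "STL", "BLK", "TOV", "PF", "PTS"] ++ ["Awards"] := by decide
  have hmem : "Awards" ∉
      (["Season", "Team", "Conf", "Class", "Pos", "G", "GS", "MP", "FG", "FGA", "FG%",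
        "3P", "3PA", "3P%", "2P", "2PA", "2P%", "eFG%", "FT", "FTA", "FT%",
        "ORB", "DRB", "TRB", "AST", "STL", "BLK", "TOV", "PF", "PTS"] : List String) := by decide
  have hlen30 : (["Season", "Team", "Conf", "Class", "Pos", "G", "GS", "MP", "FG", "FGA", "FG%",
        "3P", "3PA", "3P%", "2P", "2PA", "2P%", "eFG%", "FT", "FTA", "FT%",
        "ORB", "DRB", "TRB", "AST", "STL", "BLK", "TOV", "PF", "PTS"] : List String).length = 30 := rfl
  rw [hsplit, pvFieldsA_eq_fieldRow _ parts 0 hmem, pvFieldRow_eq_zip, hlen30]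
  simp only [List.drop_zero, Nat.zero_add]
  unfold pvRowB
  have hvals :
      ((PySem.List.slice parts none (some 30)).map some
        ++ List.replicate (30 - parts.length) none).length = 30 := by
    rw [PySem.List.slice_to parts (by norm_num)]
    simp only [List.length_append, List.length_map, List.length_take, List.length_replicate]
    omega
  rw [pvItems_ofList_nodup]
  · have hHB : pvHeadersB
        = ["Season", "Team", "Conf", "Class", "Pos", "G", "GS", "MP", "FG", "FGA", "FG%",
           "3P", "3PA", "3P%", "2P", "2PA", "2P%", "eFG%", "FT", "FTA", "FT%",
           "ORB", "DRB", "TRB", "AST", "STL", "BLK", "TOV", "PF", "PTS"] ++ ["Awards"] := by decide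
    rw [hHB, List.zip_append (by simpa using hvals.symm)]
    rw [PySem.List.slice_to parts (by norm_num), PySem.List.slice_from parts (by norm_num)]
    have h30 : (30 : Int).toNat = 30 := rfl
    rw [h30]
    simp [gt_iff_lt]
  · rw [List.map_fst_zip]
    · decide
    · rw [List.length_append, hvals, List.length_singleton]
      decide

-- ---- GROUPS: A's accumulate loop and B's recursive slicing produce the same groups ----

-- A's grouping, as a recursion with the open group of lines made explicit
def pvSpecGo (cur : List String) (ls : List String) : List (List String) :=
  match ls with
  | [] => [cur]
  | l :: rest =>
    if pvIsNewA (PySem.Str.split₀ l) then cur :: pvSpecGo [l] rest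
    else pvSpecGo (cur ++ [l]) rest

-- A's fold equals pvSpecGo (joined with spaces)
theorem pvFoldA_eq_specGo (ls : List String) : ∀ (s : List String) (cur : List String),
    cur ≠ [] →
    (if (ls.foldl pvStepA (s, cur)).2.isEmpty then (ls.foldl pvStepA (s, cur)).1
     else (ls.foldl pvStepA (s, cur)).1 ++ [PySem.Str.join " " (ls.foldl pvStepA (s, cur)).2])
      = s ++ (pvSpecGo cur ls).map (PySem.Str.join " ") := by
  induction ls with
  | nil =>
    intro s cur hcur
    have : cur.isEmpty = false := by cases cur with | nil => exact absurd rfl hcur | cons a b => rfl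
    simp [pvSpecGo, this]
  | cons l rest ih =>
    intro s cur hcur
    have hemp : cur.isEmpty = false := by cases cur with | nil => exact absurd rfl hcur | cons a b => rfl
    by_cases hnew : pvIsNewA (PySem.Str.split₀ l)
    · simp only [List.foldl_cons, pvStepA, hnew, if_true, hemp, Bool.false_eq_true, if_false]
      rw [ih (s ++ [PySem.Str.join " " cur]) [l] (by simp)]
      simp [pvSpecGo, hnew]
    · simp only [List.foldl_cons, pvStepA, hnew, Bool.false_eq_true, if_false]
      rw [ih s (cur ++ [l]) (by simp)]
      simp [pvSpecGo, hnew]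

-- pvSpecGo splits off the maximal run of non-new lines
theorem pvSpecGo_takeWhile (ls : List String) : ∀ (cur : List String),
    pvSpecGo cur ls
      = (cur ++ ls.takeWhile (fun l => ! pvIsNewA (PySem.Str.split₀ l)))
        :: (match ls.dropWhile (fun l => ! pvIsNewA (PySem.Str.split₀ l)) with
            | [] => []
            | l' :: ls' => pvSpecGo [l'] ls') := by
  induction ls with
  | nil => intro cur; simp [pvSpecGo]
  | cons l rest ih =>
    intro cur
    by_cases hnew : pvIsNewA (PySem.Str.split₀ l)
    · simp [pvSpecGo, hnew]
    · simp only [pvSpecGo, hnew, Bool.false_eq_true, if_false, List.takeWhile_cons,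
        List.dropWhile_cons, Bool.not_false, if_true, ih (cur ++ [l]), List.append_assoc,
        List.cons_append, List.nil_append]

-- the while loop of _groups computes 1 + (length of the non-new run after the head)
theorem pvExtent_eq (toks : List (List String)) (i : Nat) :
    pvExtent toks i = i + ((toks.drop i).takeWhile (fun u => ! pvIsNewB u)).length := by
  unfold pvExtent
  split
  · rename_i h
    obtain ⟨hlt, hnew⟩ := h
    have hdrop : toks.drop i = toks[i] :: toks.drop (i + 1) := List.drop_eq_getElem_cons hlt
    have hget : toks.getD i [] = toks[i] := List.getD_eq_getElem toks [] hlt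
    rw [pvExtent_eq toks (i + 1), hdrop]
    rw [hget] at hnew
    simp only [List.takeWhile_cons, Bool.not_eq_true'] at *
    rw [if_pos (by simpa using hnew)]
    simp only [List.length_cons]
    omega
  · rename_i h
    by_cases hlt : i < toks.length
    · have hnew : pvIsNewB (toks.getD i []) = true := by
        by_contra hc
        exact h ⟨hlt, hc⟩
      have hdrop : toks.drop i = toks[i] :: toks.drop (i + 1) := List.drop_eq_getElem_cons hlt
      have hget : toks.getD i [] = toks[i] := List.getD_eq_getElem toks [] hlt
      rw [hdrop, List.takeWhile_cons]
      rw [hget] at hnew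
      simp [hnew]
    · rw [List.drop_of_length_le (Nat.not_lt.mp hlt)]
      simp
  termination_by toks.length - i
  decreasing_by omega

-- ts.take/drop at the takeWhile length ARE takeWhile/dropWhile
theorem pvTake_len_takeWhile (p : List String → Bool) (ts : List (List String)) :
    ts.take (ts.takeWhile p).length = ts.takeWhile p := by
  induction ts with
  | nil => rfl
  | cons a l ih => by_cases h : p a <;> simp [h, ih]

theorem pvDrop_len_takeWhile (p : List String → Bool) (ts : List (List String)) :
    ts.drop (ts.takeWhile p).length = ts.dropWhile p := by
  induction ts with
  | nil => rfl
  | cons a l ih => by_cases h : p a <;> simp [h, ih]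

theorem pvGroupsB_nil : pvGroupsB [] = [] := by
  rw [pvGroupsB]
  rfl

-- B's recursion, unfolded once on a nonempty token list
theorem pvGroupsB_cons (t : List String) (ts : List (List String)) :
    pvGroupsB (t :: ts)
      = (t :: ts.takeWhile (fun u => ! pvIsNewB u)).flatten
        :: pvGroupsB (ts.dropWhile (fun u => ! pvIsNewB u)) := by
  rw [pvGroupsB]
  simp only [List.isEmpty_cons, Bool.false_eq_true, if_false]
  have he : pvExtent (t :: ts) 1 = (ts.takeWhile (fun u => ! pvIsNewB u)).length + 1 := by
    rw [pvExtent_eq]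
    show 1 + _ = _
    rw [Nat.add_comm]
    rfl
  rw [he, PySem.List.slice_to_natCast, PySem.List.slice_from_natCast,
    List.take_succ_cons, List.drop_succ_cons, pvTake_len_takeWhile, pvDrop_len_takeWhile]

-- the two new-season tests agree (identical Python expressions)
theorem pvIsNew_eq (t : List String) : pvIsNewA t = pvIsNewB t := rfl

-- B's groups of tokens are A's groups of lines, tokenised
theorem pvGroupsB_eq_specGo (n : Nat) : ∀ (ls : List String) (l : String), ls.length ≤ n →
    pvGroupsB ((l :: ls).map PySem.Str.split₀)
      = (pvSpecGo [l] ls).map (fun g => g.flatMap PySem.Str.split₀) := by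
  induction n with
  | zero =>
    intro ls l hle
    have : ls = [] := List.eq_nil_of_length_eq_zero (Nat.le_zero.mp hle)
    subst this
    simp [pvGroupsB_cons, pvGroupsB_nil, pvSpecGo]
  | succ n ih =>
    intro ls l hle
    rw [List.map_cons, pvGroupsB_cons, pvSpecGo_takeWhile]
    rw [List.takeWhile_map, List.dropWhile_map]
    have hpred : ((fun u => ! pvIsNewB u) ∘ PySem.Str.split₀)
        = (fun l => ! pvIsNewA (PySem.Str.split₀ l)) := by
      funext x; simp [pvIsNew_eq]
    rw [hpred]
    rcases hdw : ls.dropWhile (fun l => ! pvIsNewA (PySem.Str.split₀ l)) with _ | ⟨l', ls'⟩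
    · simp [pvGroupsB_nil, List.flatMap_def]
    · have hlen : ls'.length ≤ n := by
        have h1 : (ls.dropWhile (fun l => ! pvIsNewA (PySem.Str.split₀ l))).length ≤ ls.length :=
          List.length_dropWhile_le _ _
        rw [hdw] at h1
        simp only [List.length_cons] at h1
        omega
      rw [← List.map_cons, ih ls' l' hlen]
      simp [List.flatMap_def]

-- ===== VERDICT (by name: the statement is the Claim_ definition above) =====
theorem parse_stats_table_spec : Claim_equal_parse_stats_table := by
  intro table_text _
  show parse_stats_table table_text = parse_stats_table_alt table_text
  rw [parse_stats_table, parse_stats_table_alt]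
  generalize PySem.List.slice ((PySem.Str.split? table_text "\n").getD []) (some 1) none = d
  rcases d with _ | ⟨l, ls⟩
  · simp [pvGroupsB_nil]
  · -- the first iteration of A's loop always yields ([], [l])
    have hfirst : pvStepA ([], []) l = ([], [l]) := by
      unfold pvStepA
      by_cases h : pvIsNewA (PySem.Str.split₀ l) <;> simp [h]
    simp only [List.foldl_cons, hfirst]
    rw [pvFoldA_eq_specGo ls [] [l] (by simp),
      pvGroupsB_eq_specGo ls.length ls l (Nat.le_refl _)]
    simp only [List.nil_append, List.map_map]
    apply List.map_congr_left
    intro g _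
    simp only [Function.comp]
    rw [pvStrSplit0_join, pvRow_eq]
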